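-- pv_equiv track=rewrite | github.com/Xabab/stego | logic/Stego.py | encodePayload
-- ===== SOURCE A (Python) =====
-- from typing import List, Callable
--
-- def encodePayload(string: str, eof: str = "") -> List[int]:
--     bitListString = ''
--     for i in bytearray(string + eof, encoding='utf-8'):
--         bitListString += format(i, '#010b')[2:]
--
--     bitArray = []
--     for bit in bitListString:
--         bitArray.append(int(bit))
--
--     return bitArray
-- ===== SOURCE B (Python) =====
-- def encodePayload(string: str, eof: str = ""):
--     bits = []
--     for byte in bytearray(string + eof, encoding='utf-8'):
--         for k in range(7, -1, -1):
--             bits.append((byte >> k) & 1)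
--     return bits
-- ===== Notes on version B (the rewrite author's own statement) =====
-- stated objective: simpler
-- what changed: B extracts each bit arithmetically with shift-and-mask in one nested pass, eliminating A's intermediate binary-format string and its separate character-reparsing loop.
import Mathlib
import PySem

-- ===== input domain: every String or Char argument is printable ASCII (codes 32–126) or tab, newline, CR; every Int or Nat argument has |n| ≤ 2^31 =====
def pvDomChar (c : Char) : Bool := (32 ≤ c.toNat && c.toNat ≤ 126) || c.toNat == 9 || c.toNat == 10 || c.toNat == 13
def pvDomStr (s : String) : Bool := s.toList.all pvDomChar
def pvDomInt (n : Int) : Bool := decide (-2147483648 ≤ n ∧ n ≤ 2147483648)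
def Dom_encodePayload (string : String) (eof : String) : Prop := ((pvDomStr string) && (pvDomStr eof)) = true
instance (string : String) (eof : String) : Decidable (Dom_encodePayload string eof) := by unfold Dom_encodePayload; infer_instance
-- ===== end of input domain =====

-- B replaces A's intermediate binary-format string and second reparsing loop by direct
-- shift-and-mask bit extraction in one nested pass (objective: simpler).
-- Both ports iterate characters with Char.toNat for the utf-8 byte: exact on the ASCII domain Dom_.

-- ===== PORT A =====
-- port of format(i, '#010b')[2:] for 0 ≤ i < 256: binary digits by repeated division,
-- zero-padded on the left to width 8 (fuel 8 suffices below 256); exact there.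
def pvBinDigitsAux : Nat → Nat → List Char
  | 0, _ => []
  | _ + 1, 0 => []
  | fuel + 1, n => pvBinDigitsAux fuel (n / 2) ++ [if n % 2 == 1 then '1' else '0']

def pvBinFormat8 (i : Nat) : List Char :=
  let d := pvBinDigitsAux 8 i
  List.replicate (8 - d.length) '0' ++ d

def encodePayload (string : String) (eof : String) : List Int :=
  let bytes := (string ++ eof).toList.map Char.toNat
  let bitListString := bytes.foldl (fun acc i => acc ++ pvBinFormat8 i) []
  -- int(bit): exact on the digit characters '0'/'1' produced above
  bitListString.foldl (fun arr bit => arr ++ [((bit.toNat : Int) - 48)]) []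

-- ===== PORT B =====
def encodePayload_alt (string : String) (eof : String) : List Int :=
  (string ++ eof).toList.foldl
    (fun bits c =>
      (PySem.List.pyRange 7 (-1) (-1)).foldl
        (fun bits k => bits ++ [(((c.toNat >>> k.toNat) &&& 1 : Nat) : Int)]) bits)
    []

-- ===== PRECONDITION & SPEC =====
def Spec_encodePayload (string : String) (eof : String) (out : List Int) : Prop := out = encodePayload_alt string eof
instance (string : String) (eof : String) (out : List Int) : Decidable (Spec_encodePayload string eof out) := by unfold Spec_encodePayload; infer_instance

-- ===== CLAIM (what is proved, stated in full; the proofs are below) =====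
def Claim_equal_encodePayload : Prop := ∀ (string : String) (eof : String), Dom_encodePayload string eof → Spec_encodePayload string eof (encodePayload string eof)

-- ===== LEMMAS AND PROOFS =====

-- B's 8 bits of one character, as a plain list
def pvBitsB (c : Char) : List Int :=
  [7, 6, 5, 4, 3, 2, 1, 0].map (fun k => (((c.toNat >>> k) &&& 1 : Nat) : Int))

lemma pvRange_desc : PySem.List.pyRange 7 (-1) (-1) = [7, 6, 5, 4, 3, 2, 1, 0] := by decide

lemma pvInnerB (c : Char) (bits : List Int) :
    (PySem.List.pyRange 7 (-1) (-1)).foldl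
      (fun bits k => bits ++ [(((c.toNat >>> k.toNat) &&& 1 : Nat) : Int)]) bits
      = bits ++ pvBitsB c := by
  rw [pvRange_desc]
  simp only [List.foldl_cons, List.foldl_nil, List.append_assoc]
  simp [pvBitsB]

lemma pvAltFlat (string eof : String) :
    encodePayload_alt string eof = (string ++ eof).toList.flatMap pvBitsB := by
  unfold encodePayload_alt
  have h : ∀ (l : List Char) (acc : List Int),
      l.foldl (fun bits c =>
        (PySem.List.pyRange 7 (-1) (-1)).foldl
          (fun bits k => bits ++ [(((c.toNat >>> k.toNat) &&& 1 : Nat) : Int)]) bits) acc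
        = acc ++ l.flatMap pvBitsB := by
    intro l
    induction l with
    | nil => simp
    | cons c t ih =>
        intro acc
        simp only [List.foldl_cons]
        rw [pvInnerB, ih, List.append_assoc]
        simp
  simpa using h (string ++ eof).toList []

-- A's bits of one byte: the formatted chars mapped through int(·)
def pvBitsA (n : Nat) : List Int := (pvBinFormat8 n).map (fun bit => ((bit.toNat : Int) - 48))

lemma pvAFlat (string eof : String) :
    encodePayload string eof = ((string ++ eof).toList.map Char.toNat).flatMap pvBitsA := by
  unfold encodePayload
  rw [PySem.List.foldl_append_eq_flatMap, PySem.List.foldl_append_eq_flatMap]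
  simp [pvBitsA, List.flatMap_assoc, List.map_eq_flatMap]

-- bytewise agreement on all ASCII values
lemma pvByte_eq (n : Fin 128) :
    pvBitsA n = [7, 6, 5, 4, 3, 2, 1, 0].map (fun k => ((((n : Nat) >>> k) &&& 1 : Nat) : Int)) := by
  revert n; decide

lemma pvChar_eq (c : Char) (h : pvDomChar c = true) : pvBitsA c.toNat = pvBitsB c := by
  have hlt : c.toNat < 128 := by
    simp [pvDomChar] at h
    omega
  simpa [pvBitsB] using pvByte_eq ⟨c.toNat, hlt⟩

-- ===== VERDICT (by name: the statement is the Claim_ definition above) =====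
theorem encodePayload_spec : Claim_equal_encodePayload := by
  intro string eof hdom
  unfold Spec_encodePayload
  rw [pvAFlat, pvAltFlat, List.flatMap_map]
  apply List.flatMap_congr
  intro c hc
  apply pvChar_eq
  have hdom' := hdom
  unfold Dom_encodePayload at hdom'
  simp [pvDomStr, List.all_eq_true] at hdom'
  rcases List.mem_append.mp (by simpa using hc) with h | h
  · exact hdom'.1 c h
  · exact hdom'.2 c h
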